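-- pv_equiv track=rewrite | github.com/bgalitsky/halluc_in_health | asp/argum_text_asp_app.py | parse_af_from_text
-- ===== SOURCE A (Python) =====
-- def parse_af_from_text(content):
--     args, atts = [], []
--     in_atts = False
--     for line in content.splitlines():
--         line = line.strip()
--         if line.startswith("Arguments:"):
--             args = [a.strip() for a in line[len("Arguments:"):].split(",") if a.strip()]
--         elif line.startswith("Attacks:"):
--             in_atts = True
--         elif in_atts and "->" in line:
--             x, y = [p.strip() for p in line.split("->")]
--             atts.append((x, y))
--     return args, atts
-- ===== SOURCE B (Python) =====
-- def parse_af_from_text(content):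
--     # Phase 1: one pass to record the last "Arguments:" line and the first "Attacks:" marker index.
--     lines = [ln.strip() for ln in content.splitlines()]
--     args = []
--     marker = None
--     for i, ln in enumerate(lines):
--         if ln.startswith("Arguments:"):
--             args = [a.strip() for a in ln[len("Arguments:"):].split(",") if a.strip()]
--         elif ln.startswith("Attacks:") and marker is None:
--             marker = i
--     # Phase 2: collect attacks only from the lines after the first marker.
--     atts = []
--     if marker is not None:
--         for ln in lines[marker + 1:]:
--             if ln.startswith("Arguments:") or ln.startswith("Attacks:"):
--                 continue
--             if "->" in ln:
--                 x, y = [p.strip() for p in ln.split("->")]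
--                 atts.append((x, y))
--     return args, atts
-- ===== Notes on version B (the rewrite author's own statement) =====
-- stated objective: alternative
-- what changed: Replaces A's single stateful scan (in_atts flag threaded through every line) by a two-phase decomposition: one pass records the last 'Arguments:' line and the index of the first 'Attacks:' marker, then a second loop over only the lines after that marker collects the attacks.
import Mathlib
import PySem

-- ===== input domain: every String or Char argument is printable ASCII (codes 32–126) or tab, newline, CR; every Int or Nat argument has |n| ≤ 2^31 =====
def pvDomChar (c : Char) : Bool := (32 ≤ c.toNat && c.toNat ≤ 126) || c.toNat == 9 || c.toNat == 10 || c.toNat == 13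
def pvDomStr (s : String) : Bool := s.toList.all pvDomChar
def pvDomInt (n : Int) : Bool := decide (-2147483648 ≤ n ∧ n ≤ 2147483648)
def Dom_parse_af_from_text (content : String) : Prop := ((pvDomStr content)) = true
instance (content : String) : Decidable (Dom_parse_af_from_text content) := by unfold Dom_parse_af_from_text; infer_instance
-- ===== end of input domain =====

-- B replaces A's single stateful scan by a two-phase decomposition (record last 'Arguments:' line
-- and first 'Attacks:' marker index, then collect attacks only from the lines after the marker).

-- ===== PORT A =====
def pvIsArg (line : String) : Bool := PySem.Str.startswith line "Arguments:"
def pvIsAtk (line : String) : Bool := PySem.Str.startswith line "Attacks:"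
def pvHasArrow (line : String) : Bool := PySem.Str.isIn "->" line
-- line.split("->") stripped ("->" ≠ "", so split? is always some)
def pvSplitArrow (line : String) : List String :=
  ((PySem.Str.split? line "->").getD []).map PySem.Str.strip
-- args parsed from an "Arguments:" line: line[len("Arguments:"):].split(",") stripped, empties dropped
def pvArgsOfA (line : String) : List String :=
  (((PySem.Str.split? (PySem.Str.slice line (some 10) none) ",").getD []).filter
      (fun a => !(PySem.Str.strip a == ""))).map PySem.Str.strip

def pvStepA (st : List String × List (String × String) × Bool) (rawline : String) :
    List String × List (String × String) × Bool :=
  let line := PySem.Str.strip rawline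
  if pvIsArg line then (pvArgsOfA line, st.2.1, st.2.2)
  else if pvIsAtk line then (st.1, st.2.1, true)
  else if st.2.2 && pvHasArrow line then
    match pvSplitArrow line with
    | [x, y] => (st.1, st.2.1 ++ [(x, y)], st.2.2)
    | _ => st  -- Python raises ValueError here; excluded by Pre_
  else st

def parse_af_from_text (content : String) : List String × (List (String × String)) :=
  let st := (PySem.Str.splitlines content).foldl pvStepA ([], [], false)
  (st.1, st.2.1)

-- ===== PORT B =====
def pvArgsOfB (line : String) : List String :=
  (((PySem.Str.split? (PySem.Str.slice line (some 10) none) ",").getD []).filter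
      (fun a => !(PySem.Str.strip a == ""))).map PySem.Str.strip

-- phase 1: (args so far, index of first "Attacks:" marker)
def pvPhase1 (st : List String × Option Int) (p : Int × String) : List String × Option Int :=
  if pvIsArg p.2 then (pvArgsOfB p.2, st.2)
  else if pvIsAtk p.2 && st.2.isNone then (st.1, some p.1)
  else st

-- phase 2: collect attacks from one line after the marker
def pvPhase2 (atts : List (String × String)) (ln : String) : List (String × String) :=
  if pvIsArg ln || pvIsAtk ln then atts
  else if pvHasArrow ln then
    match pvSplitArrow ln with
    | [x, y] => atts ++ [(x, y)]
    | _ => atts  -- Python raises ValueError here; excluded by Pre_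
  else atts

def parse_af_from_text_alt (content : String) : List String × (List (String × String)) :=
  let lines := (PySem.Str.splitlines content).map PySem.Str.strip
  let st := (PySem.List.enumerate lines 0).foldl pvPhase1 ([], none)
  let atts := match st.2 with
    | none => []
    | some i => (PySem.List.slice lines (some (i + 1)) none).foldl pvPhase2 []
  (st.1, atts)

-- ===== PRECONDITION & SPEC =====
-- Pre_ excludes exactly the inputs on which A raises ValueError: a stripped line after the first
-- "Attacks:" marker that starts with neither keyword, contains "->" and contains it more than once
-- (the two-variable unpacking of split("->") fails); B raises there identically.
def Pre_parse_af_from_text (content : String) : Prop :=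
  let lines := (PySem.Str.splitlines content).map PySem.Str.strip
  ∀ j : Fin lines.length,
    (∃ i : Fin lines.length, i.1 < j.1 ∧ (!(pvIsArg lines[i]) && pvIsAtk lines[i]) = true) →
    (!(pvIsArg lines[j]) && !(pvIsAtk lines[j]) && pvHasArrow lines[j]) = true →
    PySem.Str.count lines[j] "->" = 1
instance (content : String) : Decidable (Pre_parse_af_from_text content) := by
  unfold Pre_parse_af_from_text; infer_instance

def pvWitness_parse_af_from_text : String := "Arguments: a, b\nAttacks:\na -> b"

def Spec_parse_af_from_text (content : String) (out : List String × (List (String × String))) : Prop := out = parse_af_from_text_alt content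
instance (content : String) (out : List String × (List (String × String))) : Decidable (Spec_parse_af_from_text content out) := by unfold Spec_parse_af_from_text; infer_instance

-- ===== CLAIM (what is proved, stated in full; the proofs are below) =====
def Claim_equal_parse_af_from_text : Prop := ∀ (content : String), Dom_parse_af_from_text content → Pre_parse_af_from_text content → Spec_parse_af_from_text content (parse_af_from_text content)

-- ===== LEMMAS AND PROOFS =====

-- A's step with the strip pushed onto the line list
def pvStepA' (st : List String × List (String × String) × Bool) (line : String) :
    List String × List (String × String) × Bool :=
  if pvIsArg line then (pvArgsOfA line, st.2.1, st.2.2)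
  else if pvIsAtk line then (st.1, st.2.1, true)
  else if st.2.2 && pvHasArrow line then
    match pvSplitArrow line with
    | [x, y] => (st.1, st.2.1 ++ [(x, y)], st.2.2)
    | _ => st
  else st

def pvArgStep (a : List String) (line : String) : List String :=
  if pvIsArg line then pvArgsOfA line else a

-- the line on which A's elif sets in_atts (= B's elif marker condition)
def pvP (line : String) : Bool := !(pvIsArg line) && pvIsAtk line

lemma pvArgsOfB_eq : pvArgsOfB = pvArgsOfA := rfl

lemma pvFoldA_strip (raw : List String) (st : List String × List (String × String) × Bool) :
    raw.foldl pvStepA st = (raw.map PySem.Str.strip).foldl pvStepA' st := by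
  rw [List.foldl_map]; rfl

-- once in_atts is true, A's fold is the args fold paired with B's phase-2 fold
lemma pvFoldA_true (ls : List String) (a : List String) (t : List (String × String)) :
    ls.foldl pvStepA' (a, t, true) = (ls.foldl pvArgStep a, ls.foldl pvPhase2 t, true) := by
  induction ls generalizing a t with
  | nil => rfl
  | cons l r ih =>
    simp only [List.foldl_cons, pvStepA', pvArgStep, pvPhase2]
    by_cases h1 : pvIsArg l
    · simp only [h1, if_true, Bool.true_or]; exact ih _ _
    · by_cases h2 : pvIsAtk l
      · simp only [h1, h2, if_false, if_true, Bool.false_or]; exact ih _ _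
      · by_cases h3 : pvHasArrow l
        · simp only [h1, h2, h3, if_false, Bool.false_or, Bool.true_and, if_true]
          rcases hm : pvSplitArrow l with _ | ⟨x, _ | ⟨y, _ | _⟩⟩ <;> simp <;> exact ih _ _
        · simp only [h1, h2, h3, if_false, Bool.false_or, Bool.true_and]; exact ih _ _

-- before the marker, A's fold = (args fold, phase-2 fold of the lines after the first marker, marker found?)
lemma pvFoldA_false (ls : List String) (a : List String) (t : List (String × String)) :
    ls.foldl pvStepA' (a, t, false) =
      (ls.foldl pvArgStep a,
       (match ls.findIdx? pvP with
        | none => t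
        | some k => (ls.drop (k + 1)).foldl pvPhase2 t),
       (ls.findIdx? pvP).isSome) := by
  induction ls generalizing a t with
  | nil => rfl
  | cons l r ih =>
    simp only [List.foldl_cons, pvStepA', pvArgStep, List.findIdx?_cons, pvP]
    by_cases h1 : pvIsArg l
    · simp only [h1, if_true, Bool.not_true, Bool.false_and]
      simp only [Bool.false_eq_true, if_false]
      rw [ih]; rcases hf : r.findIdx? pvP with _ | k <;> simp [hf]
    · by_cases h2 : pvIsAtk l
      · simp [h1, h2, pvFoldA_true]
      · simp only [h1, h2, Bool.false_and, Bool.not_false, Bool.true_and]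
        simp only [Bool.false_eq_true, if_false]
        rw [ih]; rcases hf : r.findIdx? pvP with _ | k <;> simp [hf]

-- phase 1 never changes a found marker
lemma pvPhase1_some (ls : List String) (s : Int) (a : List String) (i : Int) :
    (PySem.List.enumerate ls s).foldl pvPhase1 (a, some i) = (ls.foldl pvArgStep a, some i) := by
  induction ls generalizing s a with
  | nil => rfl
  | cons l r ih =>
    rw [PySem.List.enumerate_cons]
    simp only [List.foldl_cons, pvPhase1, pvArgStep, pvArgsOfB_eq]
    by_cases h1 : pvIsArg l <;> simp [h1, ih]

-- phase 1 computes the args fold and the index of the first marker line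
lemma pvPhase1_none (ls : List String) (s : Int) (a : List String) :
    (PySem.List.enumerate ls s).foldl pvPhase1 (a, none) =
      (ls.foldl pvArgStep a, (ls.findIdx? pvP).map (fun k : Nat => s + (k : Int))) := by
  induction ls generalizing s a with
  | nil => rfl
  | cons l r ih =>
    rw [PySem.List.enumerate_cons]
    simp only [List.foldl_cons, pvPhase1, pvArgStep, List.findIdx?_cons, pvP]
    by_cases h1 : pvIsArg l
    · simp only [h1, if_true, Bool.not_true, Bool.false_and]
      simp only [Bool.false_eq_true, if_false]
      rw [ih]
      rcases hf : r.findIdx? pvP with _ | k <;>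
        simp [hf, pvArgsOfB_eq, add_assoc, add_comm, add_left_comm]
    · by_cases h2 : pvIsAtk l
      · simp [h1, h2, pvPhase1_some]
      · simp only [h1, h2, Bool.false_and, Bool.and_true, Bool.not_false, Bool.true_and]
        simp only [Bool.false_eq_true, if_false]
        rw [ih]
        rcases hf : r.findIdx? pvP with _ | k <;>
          simp [hf, pvArgsOfB_eq, add_assoc, add_comm, add_left_comm]

-- ===== VERDICT (by name: the statement is the Claim_ definition above) =====
theorem parse_af_from_text_spec : Claim_equal_parse_af_from_text := by
  intro content _ _
  unfold Spec_parse_af_from_text parse_af_from_text parse_af_from_text_alt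
  simp only [pvFoldA_strip, pvFoldA_false, pvPhase1_none]
  rcases hf : ((PySem.Str.splitlines content).map PySem.Str.strip).findIdx? pvP with _ | k
  · simp
  · have ht : (((k : Nat) : Int) + 1).toNat = k + 1 := by omega
    simp [PySem.List.slice_from _ (show (0:Int) ≤ ((k : Nat) : Int) + 1 by omega), ht]
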